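-- pv_equiv track=rewrite | github.com/krzysztof-kacprzyk/EPISODE | episode/api.py | create_full_composition_library
-- ===== SOURCE A (Python) =====
-- def create_full_composition_library(max_length,is_infinite, simplified=False):
--
--     motif_succession_rules = {
--         '+-':['--','++'],
--         '-+':['--','++'],
--         '--':['-+'],
--         '++':['+-']
--     }
--
--     motif_infinite_types = {
--         '++':['f'],
--         '+-':['p','h'],
--         '-+':['f','h'],
--         '--':['f']
--     }
--
--     all_compositions = []
--     # dfs graph search algorithm
--     def dfs(current_composition):
--
--         if len(current_composition) > 0: # We do not add empty composition
--             if is_infinite and current_composition[-1][2] != 'c':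
--                 all_compositions.append(current_composition)
--                 return # The last motif is infinite, we cannot add more motifs
--             elif not is_infinite:
--                 all_compositions.append(current_composition)
--             # If the is_infinite but the last motif is finite, it's not a valid composition, so we do not add it to the list
--
--         if len(current_composition) == max_length:
--             return
--
--         def expand(new_motif):
--             if is_infinite:
--                 # We can make it a final motif by adding an infinite extension
--                 for infinite_extension in motif_infinite_types[new_motif]:
--                     dfs(current_composition.copy() + [new_motif + infinite_extension])
--                 # We can also add a finite extension if there is still space
--                 if len(current_composition) < max_length-1:
--                     dfs(current_composition.copy() + [new_motif + 'c'])
--             else: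
--                 dfs(current_composition.copy() + [new_motif + 'c'])
--
--         if len(current_composition) == 0:
--             for new_motif in ['+-','--','-+','++']:
--                 expand(new_motif)
--         else:
--             for new_motif in motif_succession_rules[current_composition[-1][0:2]]:
--                 expand(new_motif)
--
--     dfs([])
--
--     def is_simple(composition):
--         for i in range(2,len(composition)):
--             if composition[i][:2] == composition[i-2][:2]:
--                 return False
--         return True
--
--     if simplified:
--         all_compositions = [composition for composition in all_compositions if is_simple(composition)]
--
--     return all_compositions
-- ===== SOURCE B (Python) =====
-- def create_full_composition_library(max_length, is_infinite, simplified=False):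
--     succession = {'+-': ['--', '++'], '-+': ['--', '++'], '--': ['-+'], '++': ['+-']}
--     infinite_types = {'++': ['f'], '+-': ['p', 'h'], '-+': ['f', 'h'], '--': ['f']}
--     results = []
--     # explicit worklist DFS; each entry carries the remaining allowed length
--     stack = [(max_length, [])]
--     while stack:
--         rem, comp = stack.pop()
--         if comp:
--             if is_infinite:
--                 if comp[-1][2] != 'c':
--                     results.append(comp)
--                     continue
--             else:
--                 results.append(comp)
--         if rem <= 0:
--             continue
--         motifs = ['+-', '--', '-+', '++'] if not comp else succession[comp[-1][:2]]
--         children = []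
--         for m in motifs:
--             if is_infinite:
--                 for ext in infinite_types[m]:
--                     children.append((rem - 1, comp + [m + ext]))
--                 if rem >= 2:
--                     children.append((rem - 1, comp + [m + 'c']))
--             else:
--                 children.append((rem - 1, comp + [m + 'c']))
--         stack.extend(reversed(children))
--     if simplified:
--         return [c for c in results
--                 if all(a[:2] != b[:2] for a, b in zip(c, c[2:]))]
--     return results
-- ===== Notes on version B (the rewrite author's own statement) =====
-- stated objective: alternative
-- what changed: Replaces the recursive closure-based DFS that mutates an enclosing results list with an explicit stack worklist of (remaining-length, composition) pairs pushed in reversed order to preserve the pre-order output, and replaces the index-based is_simple filter with a zip-based comprehension.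
-- outside the precondition, e.g. on create_full_composition_library(-1, True, True): A returns [['+-p'], ['+-h'], ['--f'], ['-+f'], ['-+h'], ['++f']], B returns []; on create_full_composition_library(-1, False, False): A raises RecursionError, B returns []
import Mathlib
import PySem

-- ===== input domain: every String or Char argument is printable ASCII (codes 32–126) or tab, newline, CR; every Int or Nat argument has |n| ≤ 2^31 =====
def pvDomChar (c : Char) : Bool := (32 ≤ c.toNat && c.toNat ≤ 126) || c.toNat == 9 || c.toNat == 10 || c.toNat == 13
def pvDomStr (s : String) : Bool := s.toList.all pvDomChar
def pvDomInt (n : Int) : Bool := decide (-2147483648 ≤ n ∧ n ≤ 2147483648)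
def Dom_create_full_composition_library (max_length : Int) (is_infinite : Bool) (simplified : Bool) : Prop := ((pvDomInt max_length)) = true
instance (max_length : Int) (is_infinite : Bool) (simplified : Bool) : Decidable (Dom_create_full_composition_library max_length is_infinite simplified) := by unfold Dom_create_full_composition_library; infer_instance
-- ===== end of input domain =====

-- B replaces A's recursive closure-based DFS by an explicit stack worklist (children pushed in
-- reversed order to keep the pre-order output) and a zip-based simplicity filter; objective: alternative.


-- ===== PORT A =====
-- the two dict literals of the Python source (shared by both ports: both Pythons carry the same literals)
def pvSuccRules : PySem.Dict String (List String) :=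
  PySem.Dict.ofList [("+-", ["--", "++"]), ("-+", ["--", "++"]), ("--", ["-+"]), ("++", ["+-"])]
def pvInfTypes : PySem.Dict String (List String) :=
  PySem.Dict.ofList [("++", ["f"]), ("+-", ["p", "h"]), ("-+", ["f", "h"]), ("--", ["f"])]

-- comp[-1][2]  (only inspected under a 'len(comp) > 0' guard, so the "" default is never reached)
def pvLastThird (comp : List String) : Option Char :=
  PySem.Str.pyGet? ((PySem.List.pyGet? comp (-1)).getD "") 2
-- comp[-1][0:2]
def pvFirstTwoLast (comp : List String) : String :=
  PySem.Str.slice ((PySem.List.pyGet? comp (-1)).getD "") (some 0) (some 2)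
-- s[:2]
def pvFirstTwo (s : String) : String := PySem.Str.slice s (some 0) (some 2)

-- A's recursive dfs.  Python checks 'len(cur) == max_length'; the port carries the remaining
-- allowed length 'fuel = max_length - len(cur)' (a Nat), exact for 0 ≤ max_length (= Pre_):
-- 'len == max_length' is 'fuel = 0' and 'len(cur) < max_length - 1' is '1 ≤ f' for fuel = f+1.
-- The mutated outer list all_compositions is threaded as the accumulator 'acc'.
mutual
def pvDfsA (iinf : Bool) (fuel : Nat) (cur : List String) (acc : List (List String)) :
    List (List String) :=
  if 0 < cur.length ∧ iinf = true ∧ pvLastThird cur ≠ some 'c' then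
    acc ++ [cur]
  else
    let acc1 := if 0 < cur.length ∧ iinf = false then acc ++ [cur] else acc
    match fuel with
    | 0 => acc1
    | f + 1 =>
      let motifs := if cur.length = 0 then ["+-", "--", "-+", "++"]
                    else PySem.Dict.getD pvSuccRules (pvFirstTwoLast cur) []
      motifs.foldl (fun a m => pvExpandA iinf f cur a m) acc1
  termination_by 2 * fuel

-- the nested 'def expand(new_motif)'; f is the child fuel (= fuel - 1 of the caller)
def pvExpandA (iinf : Bool) (f : Nat) (cur : List String) (acc : List (List String)) (m : String) :
    List (List String) :=
  if iinf then
    let acc2 := (PySem.Dict.getD pvInfTypes m []).foldl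
        (fun a e => pvDfsA iinf f (cur ++ [m ++ e]) a) acc
    if 1 ≤ f then pvDfsA iinf f (cur ++ [m ++ "c"]) acc2 else acc2
  else
    pvDfsA iinf f (cur ++ [m ++ "c"]) acc
  termination_by 2 * f + 1
end

-- is_simple: 'for i in range(2, len(comp)): if comp[i][:2] == comp[i-2][:2]: return False'
def pvIsSimpleA (comp : List String) : Bool :=
  (PySem.List.pyRange 2 (PySem.List.len comp) 1).all fun i =>
    !(pvFirstTwo ((PySem.List.pyGet? comp i).getD "") ==
      pvFirstTwo ((PySem.List.pyGet? comp (i - 2)).getD ""))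

def create_full_composition_library (max_length : Int) (is_infinite : Bool) (simplified : Bool) :
    List (List String) :=
  -- dfs([]) with initial fuel max_length (toNat: exact for 0 ≤ max_length, see Pre_)
  let all := pvDfsA is_infinite max_length.toNat [] []
  if simplified then all.filter (fun c => pvIsSimpleA c) else all

-- ===== PORT B =====
-- the per-motif block of B's children loop (child fuel f = rem - 1; 'rem >= 2' is '1 ≤ f')
def pvChildrenOfMotif (iinf : Bool) (f : Nat) (comp : List String) (m : String) :
    List (Nat × List String) :=
  if iinf then
    ((PySem.Dict.getD pvInfTypes m []).map (fun e => (f, comp ++ [m ++ e]))) ++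
      (if 1 ≤ f then [(f, comp ++ [m ++ "c"])] else [])
  else
    [(f, comp ++ [m ++ "c"])]


-- lemmas the port pvLoopB needs for its termination argument (cited in its decreasing_by)
lemma pv_succ_getD_len (m : String) : (PySem.Dict.getD pvSuccRules m []).length ≤ 4 := by
  have h : pvSuccRules = PySem.Dict.mk [("+-", ["--", "++"]), ("-+", ["--", "++"]), ("--", ["-+"]), ("++", ["+-"])] := by decide
  rw [h, PySem.Dict.getD_eq_get?_getD]
  repeat rw [PySem.Dict.get?_mk_cons]
  split_ifs <;> simp [PySem.Dict.get?]

lemma pv_inf_getD_len (m : String) : (PySem.Dict.getD pvInfTypes m []).length ≤ 2 := by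
  have h : pvInfTypes = PySem.Dict.mk [("++", ["f"]), ("+-", ["p", "h"]), ("-+", ["f", "h"]), ("--", ["f"])] := by decide
  rw [h, PySem.Dict.getD_eq_get?_getD]
  repeat rw [PySem.Dict.get?_mk_cons]
  split_ifs <;> simp [PySem.Dict.get?]

lemma pv_cof_fst (iinf : Bool) (f : Nat) (comp : List String) (m : String) :
    ∀ p ∈ pvChildrenOfMotif iinf f comp m, p.1 = f := by
  intro p hp
  unfold pvChildrenOfMotif at hp
  split at hp
  · rcases List.mem_append.1 hp with h | h
    · obtain ⟨e, _, rfl⟩ := List.mem_map.1 h; rfl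
    · split at h <;> simp_all
  · simp_all

lemma pv_cof_len (iinf : Bool) (f : Nat) (comp : List String) (m : String) :
    (pvChildrenOfMotif iinf f comp m).length ≤ 3 := by
  unfold pvChildrenOfMotif
  split
  · have := pv_inf_getD_len m
    simp only [List.length_append, List.length_map]
    split <;> simp <;> omega
  · simp

lemma pv_children_bound (iinf : Bool) (f : Nat) (comp : List String) (motifs : List String)
    (h4 : motifs.length ≤ 4) :
    ((motifs.foldl (fun ch m => ch ++ pvChildrenOfMotif iinf f comp m) []).map
      (fun p : Nat × List String => 13 ^ (p.1 + 1))).sum < 13 ^ (f + 1 + 1) := by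
  rw [PySem.List.foldl_append_eq_flatMap]
  simp only [List.nil_append]
  have hlen : (motifs.flatMap (pvChildrenOfMotif iinf f comp)).length ≤ 12 := by
    rw [List.length_flatMap]
    calc (motifs.map (fun m => (pvChildrenOfMotif iinf f comp m).length)).sum
        ≤ (motifs.map (fun m => (pvChildrenOfMotif iinf f comp m).length)).length • 3 :=
          List.sum_le_card_nsmul _ 3 (by
            intro x hx
            obtain ⟨m, _, rfl⟩ := List.mem_map.1 hx
            exact pv_cof_len iinf f comp m)
      _ ≤ 12 := by simp only [List.length_map, smul_eq_mul]; omega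
  calc ((motifs.flatMap (pvChildrenOfMotif iinf f comp)).map
          (fun p : Nat × List String => 13 ^ (p.1 + 1))).sum
      ≤ ((motifs.flatMap (pvChildrenOfMotif iinf f comp)).map
          (fun p : Nat × List String => 13 ^ (p.1 + 1))).length • 13 ^ (f + 1) :=
        List.sum_le_card_nsmul _ _ (by
          intro x hx
          obtain ⟨p, hp, rfl⟩ := List.mem_map.1 hx
          obtain ⟨m, _, hpm⟩ := List.mem_flatMap.1 hp
          rw [pv_cof_fst iinf f comp m p hpm])
    _ ≤ 12 * 13 ^ (f + 1) := by
        simp only [List.length_map, smul_eq_mul]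
        exact Nat.mul_le_mul_right _ hlen
    _ < 13 ^ (f + 1 + 1) := by
        have h13 : 0 < 13 ^ (f + 1) := by positivity
        have he : 13 ^ (f + 1 + 1) = 13 ^ (f + 1) * 13 := pow_succ 13 (f + 1)
        omega

-- B's while loop.  The Python stack keeps its top at the END and does
-- 'stack.extend(reversed(children)); stack.pop()'; the port keeps the top at the HEAD, so that
-- step is exactly 'children ++ rest'.  The Python entry rem is an int with an 'if rem <= 0'
-- guard; the port stores rem.toNat (identical behaviour: pushed rems are ≥ 0).
def pvLoopB (iinf : Bool) (stack : List (Nat × List String)) (res : List (List String)) :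
    List (List String) :=
  match stack with
  | [] => res
  | (rem, comp) :: rest =>
    if 0 < comp.length ∧ iinf = true ∧ pvLastThird comp ≠ some 'c' then
      pvLoopB iinf rest (res ++ [comp])
    else
      let res1 := if 0 < comp.length ∧ iinf = false then res ++ [comp] else res
      match rem with
      | 0 => pvLoopB iinf rest res1
      | f + 1 =>
        let motifs := if comp.length = 0 then ["+-", "--", "-+", "++"]
                      else PySem.Dict.getD pvSuccRules (pvFirstTwoLast comp) []
        let children := motifs.foldl (fun ch m => ch ++ pvChildrenOfMotif iinf f comp m) []
        pvLoopB iinf (children ++ rest) res1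
  termination_by (stack.map (fun p => 13 ^ (p.1 + 1))).sum
  decreasing_by
  · simp only [List.map_cons, List.sum_cons]
    exact Nat.lt_add_of_pos_left (by positivity)
  · simp only [List.map_cons, List.sum_cons]
    exact Nat.lt_add_of_pos_left (by positivity)
  · simp only [List.map_cons, List.sum_cons, List.map_append, List.sum_append]
    exact Nat.add_lt_add_right (pv_children_bound iinf f comp _ (by
      split
      · simp
      · exact pv_succ_getD_len _)) _

-- is_simple as 'all(a[:2] != b[:2] for a, b in zip(c, c[2:]))'
def pvIsSimpleB (c : List String) : Bool :=
  (c.zip (PySem.List.slice c (some 2) none)).all fun p => !(pvFirstTwo p.1 == pvFirstTwo p.2)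

def create_full_composition_library_alt (max_length : Int) (is_infinite : Bool) (simplified : Bool) :
    List (List String) :=
  let results := pvLoopB is_infinite [(max_length.toNat, [])] []
  if simplified then results.filter (fun c => pvIsSimpleB c) else results

-- ===== PRECONDITION & SPEC =====
-- Pre_ excludes negative max_length, outside the function's natural domain: there A raises
-- RecursionError when is_infinite is false (its 'len == max_length' stop is never reached), and
-- when is_infinite is true it still returns the six depth-1 infinite compositions only as an
-- accident of its 'len(cur) < max_length - 1' guard; B naturally returns [] there.
def Pre_create_full_composition_library (max_length : Int) (is_infinite : Bool) (simplified : Bool) : Prop :=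
  0 ≤ max_length
instance (max_length : Int) (is_infinite : Bool) (simplified : Bool) : Decidable (Pre_create_full_composition_library max_length is_infinite simplified) := by unfold Pre_create_full_composition_library; infer_instance
def pvWitness_create_full_composition_library : Int × Bool × Bool := (2, true, true)


def Spec_create_full_composition_library (max_length : Int) (is_infinite : Bool) (simplified : Bool) (out : List (List String)) : Prop := out = create_full_composition_library_alt max_length is_infinite simplified
instance (max_length : Int) (is_infinite : Bool) (simplified : Bool) (out : List (List String)) : Decidable (Spec_create_full_composition_library max_length is_infinite simplified out) := by unfold Spec_create_full_composition_library; infer_instance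

-- ===== CLAIM (what is proved, stated in full; the proofs are below) =====
def Claim_equal_create_full_composition_library : Prop := ∀ (max_length : Int) (is_infinite : Bool) (simplified : Bool), Dom_create_full_composition_library max_length is_infinite simplified → Pre_create_full_composition_library max_length is_infinite simplified → Spec_create_full_composition_library max_length is_infinite simplified (create_full_composition_library max_length is_infinite simplified)

-- ===== LEMMAS AND PROOFS =====

lemma pv_loop_nil (iinf : Bool) (res : List (List String)) : pvLoopB iinf [] res = res := by
  rw [pvLoopB]

lemma pv_inf_chunk (iinf : Bool) (f : Nat) (comp : List String) (m : String)
    (ih : ∀ c rest res, pvLoopB iinf ((f, c) :: rest) res = pvLoopB iinf rest (pvDfsA iinf f c res)) :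
    ∀ (exts : List String) (X : List (Nat × List String)) (res : List (List String)),
      pvLoopB iinf ((exts.map fun e => (f, comp ++ [m ++ e])) ++ X) res
        = pvLoopB iinf X (exts.foldl (fun a e => pvDfsA iinf f (comp ++ [m ++ e]) a) res) := by
  intro exts
  induction exts with
  | nil => intro X res; simp
  | cons e es ihe =>
    intro X res
    simp only [List.map_cons, List.cons_append, List.foldl_cons]
    rw [ih]
    exact ihe X _

lemma pv_motif_chunk (iinf : Bool) (f : Nat) (comp : List String) (m : String)
    (ih : ∀ c rest res, pvLoopB iinf ((f, c) :: rest) res = pvLoopB iinf rest (pvDfsA iinf f c res)) :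
    ∀ (X : List (Nat × List String)) (res : List (List String)),
      pvLoopB iinf (pvChildrenOfMotif iinf f comp m ++ X) res
        = pvLoopB iinf X (pvExpandA iinf f comp res m) := by
  intro X res
  unfold pvChildrenOfMotif pvExpandA
  cases iinf with
  | false => simp only [Bool.false_eq_true, if_false]; exact ih _ _ _
  | true =>
    simp only [if_true]
    rw [List.append_assoc, pv_inf_chunk _ f comp m ih]
    split
    · simp only [List.cons_append, List.nil_append]
      exact ih _ _ _
    · simp

lemma pv_chunk (iinf : Bool) (f : Nat) (comp : List String)
    (ih : ∀ c rest res, pvLoopB iinf ((f, c) :: rest) res = pvLoopB iinf rest (pvDfsA iinf f c res)) :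
    ∀ (motifs : List String) (X : List (Nat × List String)) (res : List (List String)),
      pvLoopB iinf (motifs.flatMap (pvChildrenOfMotif iinf f comp) ++ X) res
        = pvLoopB iinf X (motifs.foldl (fun a m => pvExpandA iinf f comp a m) res) := by
  intro motifs
  induction motifs with
  | nil => intro X res; simp
  | cons m ms ihm =>
    intro X res
    simp only [List.flatMap_cons, List.append_assoc, List.foldl_cons]
    rw [pv_motif_chunk iinf f comp m ih]
    exact ihm X _

lemma pv_key (iinf : Bool) :
    ∀ (fuel : Nat) (comp : List String) (rest : List (Nat × List String)) (res : List (List String)),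
      pvLoopB iinf ((fuel, comp) :: rest) res = pvLoopB iinf rest (pvDfsA iinf fuel comp res) := by
  intro fuel
  induction fuel with
  | zero =>
    intro comp rest res
    by_cases hcond : 0 < comp.length ∧ iinf = true ∧ pvLastThird comp ≠ some 'c'
    · rw [pvLoopB, pvDfsA]; simp [hcond]
    · rw [pvLoopB, pvDfsA]; simp [hcond]
  | succ f ihf =>
    intro comp rest res
    by_cases hcond : 0 < comp.length ∧ iinf = true ∧ pvLastThird comp ≠ some 'c'
    · rw [pvLoopB, pvDfsA]; simp [hcond]
    · rw [pvLoopB, pvDfsA]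
      simp only [if_neg hcond]
      rw [PySem.List.foldl_append_eq_flatMap]
      simp only [List.nil_append]
      exact pv_chunk iinf f comp (fun c r a => ihf c r a) _ _ _

lemma pv_is_simple_eq (c : List String) : pvIsSimpleA c = pvIsSimpleB c := by
  unfold pvIsSimpleA pvIsSimpleB
  have hslice : PySem.List.slice c (some 2) none = c.drop 2 := by
    simpa using PySem.List.slice_from_natCast (xs := c) (a := 2)
  rw [hslice, Bool.eq_iff_iff]
  simp only [List.all_eq_true]
  constructor
  · intro hA p hp
    rw [List.mem_iff_getElem] at hp
    obtain ⟨j, hj, rfl⟩ := hp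
    have hjl : j + 2 < c.length := by
      simp only [List.length_zip, List.length_drop] at hj; omega
    have hA' := hA ((j:Int) + 2) (by
      rw [PySem.List.mem_pyRange_one]
      simp [PySem.List.len_eq]
      omega)
    rw [show ((j:Int) + 2) = ((j + 2 : Nat) : Int) by push_cast; ring] at hA'
    rw [show ((j + 2 : Nat) : Int) - 2 = ((j : Nat) : Int) by push_cast; ring] at hA'
    simp only [PySem.List.pyGet?_natCast] at hA'
    rw [List.getElem?_eq_getElem hjl, List.getElem?_eq_getElem (by omega : j < c.length)] at hA'
    simp only [Option.getD_some] at hA'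
    simp only [List.getElem_zip, List.getElem_drop]
    simp only [Bool.not_eq_true'] at hA' ⊢
    rw [show getElem c (2 + j) (by omega : 2 + j < c.length) = getElem c (j + 2) hjl from by congr 1; omega]
    rw [beq_eq_false_iff_ne] at hA' ⊢
    exact Ne.symm hA'
  · intro hB i hi
    rw [PySem.List.mem_pyRange_one] at hi
    simp only [PySem.List.len_eq] at hi
    obtain ⟨hi2, hin⟩ := hi
    have hj : ∃ j : Nat, i = (j : Int) + 2 ∧ (j : Int) + 2 < c.length := by
      refine ⟨(i - 2).toNat, by omega, by omega⟩
    obtain ⟨j, rfl, hjn⟩ := hj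
    have hjl : j + 2 < c.length := by omega
    have hmem : (getElem c j (by omega : j < c.length), getElem c (j+2) hjl) ∈ c.zip (c.drop 2) := by
      rw [List.mem_iff_getElem]
      refine ⟨j, by simp only [List.length_zip, List.length_drop]; omega, ?_⟩
      simp only [List.getElem_zip, List.getElem_drop]
      refine Prod.ext ?_ ?_
      · rfl
      · show getElem c (2 + j) _ = getElem c (j + 2) hjl
        congr 1; omega
    have hB' := hB _ hmem
    rw [show ((j:Int) + 2) = ((j + 2 : Nat) : Int) by push_cast; ring]
    rw [show ((j + 2 : Nat) : Int) - 2 = ((j : Nat) : Int) by push_cast; ring]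
    simp only [PySem.List.pyGet?_natCast]
    rw [List.getElem?_eq_getElem hjl, List.getElem?_eq_getElem (by omega : j < c.length)]
    simp only [Option.getD_some]
    simp only [Bool.not_eq_true'] at hB' ⊢
    rw [beq_eq_false_iff_ne] at hB' ⊢
    exact Ne.symm hB'


-- ===== VERDICT (by name: the statement is the Claim_ definition above) =====
theorem create_full_composition_library_spec : Claim_equal_create_full_composition_library := by
  intro max_length is_infinite simplified _ _
  unfold Spec_create_full_composition_library
  unfold create_full_composition_library create_full_composition_library_alt
  rw [pv_key is_infinite max_length.toNat [] [] [], pv_loop_nil]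
  split
  · exact List.filter_congr (fun c _ => pv_is_simple_eq c)
  · rfl
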